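-- pv_equiv track=rewrite | github.com/PengKeRan/Chuan_Zhi_Bei | 初赛/03.py | func
-- ===== SOURCE A (Python) =====
-- def func(n, arr):
--     if n <= 2:
--         return 0
--     back = [0 for _ in range(n)]
--     for i in range(n - 2, -1, -1):
--         for j in range(i+1, n):
--             if arr[i] == arr[j]:
--                 back[i] = back[j] + 1
--                 break
--     front = [0 for _ in range(n)]
--     for i in range(1, n):
--         for j in range(i-1, -1, -1):
--             if arr[i] != arr[j]:
--                 front[i] += 1
--             if arr[i] == arr[j]:
--                 front[i] += front[j]
--                 break
--
--     res = 0
--     for i in range(n):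
--         res += front[i] * back[i]
--     return res
-- ===== SOURCE B (Python) =====
-- def func(n, arr):
--     if n <= 2:
--         return 0
--     total = {}
--     for i in range(n):
--         total[arr[i]] = total.get(arr[i], 0) + 1
--     res = 0
--     seen = {}
--     for i in range(n):
--         v = arr[i]
--         e = seen.get(v, 0)
--         res += (i - e) * (total[v] - e - 1)
--         seen[v] = e + 1
--     return res
-- ===== Notes on version B (the rewrite author's own statement) =====
-- stated objective: faster
-- what changed: Replaces A's two quadratic nearest-equal-neighbour scans (inner loops with break) by a single O(n) counting strategy: a dict of total value counts plus a running dict of already-seen counts give front[i]=i-earlier_equal and back[i]=total-earlier_equal-1 directly, summed in one pass.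
import Mathlib
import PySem

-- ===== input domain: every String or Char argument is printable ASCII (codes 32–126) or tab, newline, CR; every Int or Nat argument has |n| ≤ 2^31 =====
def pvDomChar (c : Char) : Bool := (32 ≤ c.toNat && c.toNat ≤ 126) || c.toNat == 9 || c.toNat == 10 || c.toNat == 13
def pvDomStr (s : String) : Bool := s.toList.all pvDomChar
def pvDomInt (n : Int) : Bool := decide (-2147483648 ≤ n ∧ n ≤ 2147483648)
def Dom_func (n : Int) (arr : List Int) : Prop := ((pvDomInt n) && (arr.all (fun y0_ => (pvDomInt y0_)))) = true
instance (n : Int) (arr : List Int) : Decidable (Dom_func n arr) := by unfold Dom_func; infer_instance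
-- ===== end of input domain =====

-- B replaces A's two quadratic nearest-equal-neighbour scans by one O(n) pass with
-- dicts of value counts (front[i] = i - earlier_equal, back[i] = total - earlier_equal - 1).

-- ===== PORT A =====
-- inner 'for j in range(i+1, n): if arr[i]==arr[j]: back[i]=back[j]+1; break'
-- (indices are in range under Pre_func, so pyGetD/pySetD are exact here)
def backInner (arr : List Int) (i : Int) (back : List Int) : List Int → List Int
  | [] => back
  | j :: js =>
    if PySem.List.pyGetD arr i 0 = PySem.List.pyGetD arr j 0 then
      PySem.List.pySetD back i (PySem.List.pyGetD back j 0 + 1)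
    else backInner arr i back js

-- inner 'for j in range(i-1, -1, -1): if arr[i]!=arr[j]: front[i]+=1; if arr[i]==arr[j]: front[i]+=front[j]; break'
def frontInner (arr : List Int) (i : Int) (front : List Int) : List Int → List Int
  | [] => front
  | j :: js =>
    let f1 := if PySem.List.pyGetD arr i 0 ≠ PySem.List.pyGetD arr j 0 then
        PySem.List.pySetD front i (PySem.List.pyGetD front i 0 + 1) else front
    if PySem.List.pyGetD arr i 0 = PySem.List.pyGetD arr j 0 then
      PySem.List.pySetD f1 i (PySem.List.pyGetD f1 i 0 + PySem.List.pyGetD f1 j 0)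
    else frontInner arr i f1 js

def func (n : Int) (arr : List Int) : Int :=
  if n ≤ 2 then 0
  else
    let back0 := (PySem.List.pyRange 0 n 1).map (fun _ => (0 : Int))
    let back := (PySem.List.pyRange (n - 2) (-1) (-1)).foldl
      (fun back i => backInner arr i back (PySem.List.pyRange (i + 1) n 1)) back0
    let front0 := (PySem.List.pyRange 0 n 1).map (fun _ => (0 : Int))
    let front := (PySem.List.pyRange 1 n 1).foldl
      (fun front i => frontInner arr i front (PySem.List.pyRange (i - 1) (-1) (-1))) front0
    (PySem.List.pyRange 0 n 1).foldl
      (fun res i => res + PySem.List.pyGetD front i 0 * PySem.List.pyGetD back i 0) 0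

-- ===== PORT B =====
-- (total[arr[i]] is always present when read, so getD is exact for B's 'total[v]')
def func_alt (n : Int) (arr : List Int) : Int :=
  if n ≤ 2 then 0
  else
    let total := (PySem.List.pyRange 0 n 1).foldl
      (fun (t : PySem.Dict Int Int) i =>
        t.insert (PySem.List.pyGetD arr i 0) (t.getD (PySem.List.pyGetD arr i 0) 0 + 1))
      PySem.Dict.empty
    let p := (PySem.List.pyRange 0 n 1).foldl
      (fun (p : Int × PySem.Dict Int Int) i =>
        let v := PySem.List.pyGetD arr i 0
        let e := p.2.getD v 0
        (p.1 + (i - e) * (total.getD v 0 - e - 1), p.2.insert v (e + 1)))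
      (0, PySem.Dict.empty)
    p.1

-- ===== PRECONDITION & SPEC =====
-- Pre_func excludes exactly the inputs where the Python A raises IndexError (n > 2 and n > len(arr));
-- B raises there too.
def Pre_func (n : Int) (arr : List Int) : Prop := n ≤ 2 ∨ n ≤ (arr.length : Int)
instance (n : Int) (arr : List Int) : Decidable (Pre_func n arr) := by unfold Pre_func; infer_instance
def pvWitness_func : Int × List Int := (4, [1, 2, 1, 2])

def Spec_func (n : Int) (arr : List Int) (out : Int) : Prop := out = func_alt n arr
instance (n : Int) (arr : List Int) (out : Int) : Decidable (Spec_func n arr out) := by unfold Spec_func; infer_instance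

-- ===== CLAIM (what is proved, stated in full; the proofs are below) =====
def Claim_equal_func : Prop := ∀ (n : Int) (arr : List Int), Dom_func n arr → Pre_func n arr → Spec_func n arr (func n arr)

-- ===== LEMMAS AND PROOFS =====

-- value at index i of the length-n prefix, and the equal-element counts before/after i
def pvVal (xs : List Int) (i : Nat) : Int := xs.getD i 0
def pvA (xs : List Int) (i : Nat) : Int := ((xs.drop (i + 1)).count (pvVal xs i) : Int)
def pvB (xs : List Int) (i : Nat) : Int := ((xs.take i).count (pvVal xs i) : Int)
def pvG (xs : List Int) (i : Nat) : Int := ((i : Int) - pvB xs i) * pvA xs i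

lemma getD_set_self (l : List Int) (i : Nat) (v : Int) (h : i < l.length) :
    (l.set i v).getD i 0 = v := by
  simp [List.getD, h]

lemma getD_set_ne (l : List Int) (i q : Nat) (v : Int) (hne : q ≠ i) :
    (l.set i v).getD q 0 = l.getD q 0 := by
  simp [List.getD, List.getElem?_set_ne (by omega : i ≠ q)]

lemma getArr (arr : List Int) (n : Int) (i : Nat) (hi : i < n.toNat) :
    PySem.List.pyGetD arr (i : Int) 0 = pvVal (arr.take n.toNat) i := by
  simp [pvVal, List.getD, List.getElem?_take_of_lt, hi]

lemma xlen (arr : List Int) (n : Int) (hle : n ≤ (arr.length : Int)) :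
    (arr.take n.toNat).length = n.toNat := by
  simp; omega

lemma back_inner_spec (arr : List Int) (n : Int) (hle : n ≤ (arr.length : Int))
    (i : Nat) (hi : i < n.toNat) :
    ∀ (j : Nat), i < j → ∀ (back : List Int),
      (∀ q : Nat, j ≤ q → q < n.toNat → back.getD q 0 = pvA (arr.take n.toNat) q) →
      backInner arr (i : Int) back (PySem.List.pyRange (j : Int) n 1) =
        if ((arr.take n.toNat).drop j).count (pvVal (arr.take n.toNat) i) = 0 then back
        else back.set i ((((arr.take n.toNat).drop j).count (pvVal (arr.take n.toNat) i) : Int)) := by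
  set xs := arr.take n.toNat with hxs
  have hxlen : xs.length = n.toNat := xlen arr n hle
  suffices H : ∀ (d : Nat), ∀ (j : Nat), n.toNat - j = d → i < j → ∀ (back : List Int),
      (∀ q : Nat, j ≤ q → q < n.toNat → back.getD q 0 = pvA xs q) →
      backInner arr (i : Int) back (PySem.List.pyRange (j : Int) n 1) =
        if (xs.drop j).count (pvVal xs i) = 0 then back
        else back.set i (((xs.drop j).count (pvVal xs i) : Int)) by
    intro j hij back hup; exact H (n.toNat - j) j rfl hij back hup
  intro d
  induction d using Nat.strong_induction_on with
  | _ d IH =>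
    intro j hd hij back hup
    by_cases hjn : (j : Int) < n
    · have hjm : j < n.toNat := by omega
      rw [PySem.List.pyRange_one_cons hjn]
      have hdropj : xs.drop j = xs[j] :: xs.drop (j + 1) :=
        List.drop_eq_getElem_cons (by omega)
      have hgj : PySem.List.pyGetD arr (j : Int) 0 = pvVal xs j := getArr arr n j hjm
      have hgi : PySem.List.pyGetD arr (i : Int) 0 = pvVal xs i := getArr arr n i hi
      have hvj : pvVal xs j = xs[j] := by simp [pvVal, List.getD, List.getElem?_eq_getElem (by omega : j < xs.length)]
      show backInner arr (i : Int) back ((j : Int) :: _) = _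
      rw [backInner]
      by_cases heq : PySem.List.pyGetD arr (i : Int) 0 = PySem.List.pyGetD arr (j : Int) 0
      · rw [if_pos heq]
        have hxj : xs[j] = pvVal xs i := by rw [← hvj, ← hgj, ← heq, hgi]
        have hcnt : (xs.drop j).count (pvVal xs i) = (xs.drop (j + 1)).count (pvVal xs i) + 1 := by
          rw [hdropj, List.count_cons]; simp [hxj]
        have hbackj : PySem.List.pyGetD back (j : Int) 0 = pvA xs j := by
          rw [PySem.List.pyGetD_natCast]; exact hup j le_rfl hjm
        have hAj : pvA xs j = ((xs.drop (j + 1)).count (pvVal xs i) : Int) := by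
          unfold pvA
          rw [hvj, hxj]
        rw [if_neg (by omega)]
        simp only [PySem.List.pySetD_natCast, hbackj, hAj, hcnt]
        push_cast
        ring_nf
      · rw [if_neg heq]
        have hxj : xs[j] ≠ pvVal xs i := by
          rw [← hvj]; intro hc; exact heq (by rw [hgi, hgj, hc])
        have hcnt : (xs.drop j).count (pvVal xs i) = (xs.drop (j + 1)).count (pvVal xs i) := by
          rw [hdropj, List.count_cons]; simp [hxj]
        have : ((j : Int) + 1) = ((j + 1 : Nat) : Int) := by push_cast; ring
        rw [this, IH (n.toNat - (j + 1)) (by omega) (j + 1) rfl (by omega) back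
          (fun q hq hq' => hup q (by omega) hq'), hcnt]
    · rw [PySem.List.pyRange_one_eq_nil (by omega)]
      have : xs.drop j = [] := List.drop_eq_nil_of_le (by omega)
      rw [backInner, this]
      simp

lemma back_loop (arr : List Int) (n : Int) (hle : n ≤ (arr.length : Int)) :
    ∀ (i : Int), -1 ≤ i → i < n → ∀ (back : List Int), back.length = n.toNat →
      (∀ q : Nat, q < n.toNat → back.getD q 0 = if i < (q : Int) then pvA (arr.take n.toNat) q else 0) →
      ∀ q : Nat, q < n.toNat →
        ((PySem.List.pyRange i (-1) (-1)).foldl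
          (fun back i => backInner arr i back (PySem.List.pyRange (i + 1) n 1)) back).getD q 0
          = pvA (arr.take n.toNat) q := by
  set xs := arr.take n.toNat with hxs
  suffices H : ∀ (d : Nat), ∀ (i : Int), (i + 1).toNat = d → -1 ≤ i → i < n →
      ∀ (back : List Int), back.length = n.toNat →
      (∀ q : Nat, q < n.toNat → back.getD q 0 = if i < (q : Int) then pvA xs q else 0) →
      ∀ q : Nat, q < n.toNat →
        ((PySem.List.pyRange i (-1) (-1)).foldl
          (fun back i => backInner arr i back (PySem.List.pyRange (i + 1) n 1)) back).getD q 0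
          = pvA xs q by
    intro i h1 h2 back h3 h4; exact H (i + 1).toNat i rfl h1 h2 back h3 h4
  intro d
  induction d using Nat.strong_induction_on with
  | _ d IH =>
    intro i hd hlb hub back hblen hinv q hq
    by_cases hineg : i < 0
    · rw [PySem.List.pyRange_neg_one_eq_nil (by omega)]
      simp only [List.foldl_nil]
      rw [hinv q hq, if_pos (by omega)]
    · have hineg' : 0 ≤ i := by omega
      rw [PySem.List.pyRange_neg_one_cons (by omega)]
      simp only [List.foldl_cons]
      have hitn : i = ((i.toNat : Nat) : Int) := by omega
      have him : i.toNat < n.toNat := by omega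
      have hstep := back_inner_spec arr n hle i.toNat him (i.toNat + 1) (by omega) back
          (fun q' hq' hq'' => by rw [hinv q' hq'', if_pos (by omega)])
      rw [show ((i.toNat : Nat) : Int) = i from by omega,
          show ((i.toNat + 1 : Nat) : Int) = i + 1 from by omega] at hstep
      rw [hstep]
      have hAi : pvA xs i.toNat = ((xs.drop (i.toNat + 1)).count (pvVal xs i.toNat) : Int) := rfl
      -- new invariant and length for the updated back
      have key : ∀ back' : List Int, back'.length = n.toNat →
          (∀ q' : Nat, q' < n.toNat → back'.getD q' 0 = if i - 1 < (q' : Int) then pvA xs q' else 0) →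
          ((PySem.List.pyRange (i - 1) (-1) (-1)).foldl
            (fun back i => backInner arr i back (PySem.List.pyRange (i + 1) n 1)) back').getD q 0
            = pvA xs q := by
        intro back' h1 h2
        exact IH (i - 1 + 1).toNat (by omega) (i - 1) rfl (by omega) (by omega) back' h1 h2 q hq
      by_cases hc : (xs.drop (i.toNat + 1)).count (pvVal xs i.toNat) = 0
      · rw [if_pos hc]
        refine key back hblen ?_
        intro q' hq'
        rw [hinv q' hq']
        by_cases hqi : (q' : Int) = i
        · rw [if_neg (by omega), if_pos (by omega)]
          have : q' = i.toNat := by omega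
          rw [this, hAi, hc]; simp
        · by_cases h2 : i < (q' : Int)
          · rw [if_pos h2, if_pos (by omega)]
          · rw [if_neg h2, if_neg (by omega)]
      · rw [if_neg hc]
        refine key _ (by simp [hblen]) ?_
        intro q' hq'
        by_cases hqi : q' = i.toNat
        · subst hqi
          rw [getD_set_self _ _ _ (by omega), if_pos (by omega), hAi]
        · rw [getD_set_ne _ _ _ _ hqi, hinv q' hq']
          by_cases h2 : i < (q' : Int)
          · rw [if_pos h2, if_pos (by omega)]
          · rw [if_neg h2, if_neg (by omega)]

lemma front_inner_spec (arr : List Int) (n : Int) (hle : n ≤ (arr.length : Int))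
    (i : Nat) (hi : i < n.toNat) :
    ∀ (j : Int), -1 ≤ j → j < (i : Int) → ∀ (front : List Int), front.length = n.toNat →
      (∀ q : Nat, (q : Int) ≤ j → front.getD q 0 = (q : Int) - pvB (arr.take n.toNat) q) →
      (frontInner arr (i : Int) front (PySem.List.pyRange j (-1) (-1))).length = n.toNat ∧
      ∀ q : Nat, q < n.toNat →
        (frontInner arr (i : Int) front (PySem.List.pyRange j (-1) (-1))).getD q 0 =
          if q = i then
            front.getD i 0 + (j + 1) - (((arr.take n.toNat).take (j + 1).toNat).count (pvVal (arr.take n.toNat) i) : Int)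
          else front.getD q 0 := by
  set xs := arr.take n.toNat with hxs
  have hxlen : xs.length = n.toNat := xlen arr n hle
  suffices H : ∀ (d : Nat), ∀ (j : Int), (j + 1).toNat = d → -1 ≤ j → j < (i : Int) →
      ∀ (front : List Int), front.length = n.toNat →
      (∀ q : Nat, (q : Int) ≤ j → front.getD q 0 = (q : Int) - pvB xs q) →
      (frontInner arr (i : Int) front (PySem.List.pyRange j (-1) (-1))).length = n.toNat ∧
      ∀ q : Nat, q < n.toNat →
        (frontInner arr (i : Int) front (PySem.List.pyRange j (-1) (-1))).getD q 0 =
          if q = i then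
            front.getD i 0 + (j + 1) - ((xs.take (j + 1).toNat).count (pvVal xs i) : Int)
          else front.getD q 0 by
    intro j h1 h2 front h3 h4; exact H (j + 1).toNat j rfl h1 h2 front h3 h4
  intro d
  induction d using Nat.strong_induction_on with
  | _ d IH =>
    intro j hd hlb hub front hflen hfin
    by_cases hjneg : j < 0
    · have hj : j = -1 := by omega
      subst hj
      rw [PySem.List.pyRange_neg_one_eq_nil (by omega)]
      refine ⟨hflen, fun q hq => ?_⟩
      show front.getD q 0 = _
      by_cases hqi : q = i
      · subst hqi; norm_num
      · rw [if_neg hqi]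
    · have hjneg' : 0 ≤ j := by omega
      set jn := j.toNat with hjn
      have hje : j = (jn : Int) := by omega
      have hjm : jn < n.toNat := by omega
      rw [PySem.List.pyRange_neg_one_cons (by omega)]
      rw [hje] at hub hfin ⊢
      have hgj : PySem.List.pyGetD arr (jn : Int) 0 = pvVal xs jn := getArr arr n jn hjm
      have hgi : PySem.List.pyGetD arr (i : Int) 0 = pvVal xs i := getArr arr n i hi
      have hvj : pvVal xs jn = xs[jn] := by
        simp [pvVal, List.getD, List.getElem?_eq_getElem (by omega : jn < xs.length)]
      have htake : xs.take (jn + 1) = xs.take jn ++ [xs[jn]] := by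
        rw [List.take_add_one, List.getElem?_eq_getElem (by omega : jn < xs.length)]
        rfl
      have hjt : ((jn : Int) + 1).toNat = jn + 1 := by omega
      rw [frontInner]
      by_cases heq : PySem.List.pyGetD arr (i : Int) 0 = PySem.List.pyGetD arr ((jn : Nat) : Int) 0
      · have hne' : ¬ (PySem.List.pyGetD arr (i : Int) 0 ≠ PySem.List.pyGetD arr ((jn : Nat) : Int) 0) := by
          simpa using heq
        simp only [hne', if_false, if_pos heq]
        have hvv : pvVal xs jn = pvVal xs i := by
          rw [← hgj, ← hgi]; exact heq.symm
        have hcnt : ((xs.take (jn + 1)).count (pvVal xs i) : Int) = pvB xs jn + 1 := by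
          rw [htake, List.count_append]
          unfold pvB
          rw [hvv, ← hvj, hvv]
          simp
        have hfj : PySem.List.pyGetD front ((jn : Nat) : Int) 0 = (jn : Int) - pvB xs jn := by
          rw [PySem.List.pyGetD_natCast]
          exact hfin jn (by exact_mod_cast le_rfl)
        constructor
        · simp [hflen]
        · intro q hq
          by_cases hqi : q = i
          · subst hqi
            rw [PySem.List.pySetD_natCast, PySem.List.pyGetD_natCast,
              getD_set_self _ _ _ (by omega), hfj, hjt, hcnt]
            simp
            ring
          · rw [PySem.List.pySetD_natCast, getD_set_ne _ _ _ _ hqi, if_neg hqi]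
      · have hne' : (PySem.List.pyGetD arr (i : Int) 0 ≠ PySem.List.pyGetD arr ((jn : Nat) : Int) 0) := heq
        simp only [if_pos hne', if_neg heq]
        set f1 := PySem.List.pySetD front (i : Int) (PySem.List.pyGetD front (i : Int) 0 + 1) with hf1
        have hf1e : f1 = front.set i (front.getD i 0 + 1) := by
          rw [hf1, PySem.List.pySetD_natCast, PySem.List.pyGetD_natCast]
        have hf1len : f1.length = n.toNat := by rw [hf1e]; simp [hflen]
        have hvv : xs[jn] ≠ pvVal xs i := by
          rw [← hvj]
          intro hc
          exact heq (by rw [hgi, hgj, hc])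
        have hcnt : (xs.take (jn + 1)).count (pvVal xs i) = (xs.take jn).count (pvVal xs i) := by
          rw [htake, List.count_append]
          simp [hvv]
        have hIH := IH ((jn : Int) - 1 + 1).toNat (by omega) ((jn : Int) - 1) rfl (by omega) (by omega) f1 hf1len
          (fun q hq => by
            rw [hf1e, getD_set_ne _ _ _ _ (by omega)]
            exact hfin q (by omega))
        refine ⟨hIH.1, fun q hq => ?_⟩
        rw [hIH.2 q hq]
        by_cases hqi : q = i
        · subst hqi
          rw [if_pos rfl, if_pos rfl, hf1e, getD_set_self _ _ _ (by omega)]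
          have h1 : ((jn : Int) - 1 + 1).toNat = jn := by omega
          rw [h1, hjt, hcnt]
          ring
        · rw [if_neg hqi, if_neg hqi, hf1e, getD_set_ne _ _ _ _ hqi]

lemma front_loop (arr : List Int) (n : Int) (hle : n ≤ (arr.length : Int)) :
    ∀ (i : Int), 1 ≤ i → i ≤ n → ∀ (front : List Int), front.length = n.toNat →
      (∀ q : Nat, q < n.toNat → front.getD q 0 = if (q : Int) < i then (q : Int) - pvB (arr.take n.toNat) q else 0) →
      ∀ q : Nat, q < n.toNat →
        ((PySem.List.pyRange i n 1).foldl
          (fun front i => frontInner arr i front (PySem.List.pyRange (i - 1) (-1) (-1))) front).getD q 0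
          = (q : Int) - pvB (arr.take n.toNat) q := by
  set xs := arr.take n.toNat with hxs
  suffices H : ∀ (d : Nat), ∀ (i : Int), (n - i).toNat = d → 1 ≤ i → i ≤ n →
      ∀ (front : List Int), front.length = n.toNat →
      (∀ q : Nat, q < n.toNat → front.getD q 0 = if (q : Int) < i then (q : Int) - pvB xs q else 0) →
      ∀ q : Nat, q < n.toNat →
        ((PySem.List.pyRange i n 1).foldl
          (fun front i => frontInner arr i front (PySem.List.pyRange (i - 1) (-1) (-1))) front).getD q 0
          = (q : Int) - pvB xs q by
    intro i h1 h2 front h3 h4; exact H (n - i).toNat i rfl h1 h2 front h3 h4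
  intro d
  induction d using Nat.strong_induction_on with
  | _ d IH =>
    intro i hd h1 h2 front hflen hinv q hq
    by_cases hin : i < n
    · rw [PySem.List.pyRange_one_cons hin]
      simp only [List.foldl_cons]
      set it := i.toNat with hit
      have hie : i = (it : Int) := by omega
      have him : it < n.toNat := by omega
      rw [hie] at hinv ⊢
      have hspec := front_inner_spec arr n hle it him ((it : Int) - 1) (by omega) (by omega)
        front hflen
        (fun q' hq' => by
          rw [hinv q' (by omega), if_pos (by omega)])
      set front' := frontInner arr ((it : Nat) : Int) front
        (PySem.List.pyRange ((it : Int) - 1) (-1) (-1)) with hfront'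
      have hstep : ∀ q' : Nat, q' < n.toNat →
          front'.getD q' 0 = if ((q' : Int)) < (it : Int) + 1 then (q' : Int) - pvB xs q' else 0 := by
        intro q' hq'
        rw [hspec.2 q' hq']
        by_cases hqi : q' = it
        · subst hqi
          rw [if_pos rfl, hinv it him, if_neg (by omega), if_pos (by omega)]
          have ht : ((it : Int) - 1 + 1).toNat = it := by omega
          rw [ht]
          unfold pvB
          ring
        · rw [if_neg hqi, hinv q' hq']
          by_cases hlt : (q' : Int) < (it : Int)
          · rw [if_pos hlt, if_pos (by omega)]
          · rw [if_neg hlt, if_neg (by omega)]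
      exact IH (n - ((it : Int) + 1)).toNat (by omega) ((it : Int) + 1) rfl (by omega) (by omega)
        front' hspec.1 hstep q hq
    · rw [PySem.List.pyRange_one_eq_nil (by omega)]
      simp only [List.foldl_nil]
      rw [hinv q hq, if_pos (by omega)]

lemma func_eq_spec (n : Int) (arr : List Int) (hn : ¬ n ≤ 2) (hle : n ≤ (arr.length : Int)) :
    func n arr = ((List.range n.toNat).map (pvG (arr.take n.toNat))).sum := by
  set xs := arr.take n.toNat with hxs
  have hxlen : xs.length = n.toNat := xlen arr n hle
  rw [func, if_neg hn]
  have hz : (PySem.List.pyRange 0 n 1).map (fun _ => (0 : Int)) = List.replicate n.toNat 0 := by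
    apply List.eq_replicate_iff.mpr
    constructor
    · simp [PySem.List.length_pyRange_one]
    · intro b hb
      simp at hb
      exact hb.2
  have hzlen : (List.replicate n.toNat (0:Int)).length = n.toNat := by simp
  have hzget : ∀ q : Nat, q < n.toNat → (List.replicate n.toNat (0:Int)).getD q 0 = 0 := by
    intro q hq; rw [List.getD_replicate _ hq]
  have hback := back_loop arr n hle (n - 2) (by omega) (by omega)
    (List.replicate n.toNat 0) hzlen
    (fun q hq => by
      rw [hzget q hq]
      by_cases hc : n - 2 < (q : Int)
      · rw [if_pos hc]
        have hq1 : q = n.toNat - 1 := by omega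
        subst hq1
        unfold pvA
        rw [show n.toNat - 1 + 1 = n.toNat from by omega]
        have hnil : xs.drop n.toNat = [] := List.drop_eq_nil_of_le (by omega)
        rw [hnil]
        simp
      · rw [if_neg hc])
  have hfront := front_loop arr n hle 1 le_rfl (by omega)
    (List.replicate n.toNat 0) hzlen
    (fun q hq => by
      rw [hzget q hq]
      by_cases hc : (q : Int) < 1
      · rw [if_pos hc]
        have hq0 : q = 0 := by omega
        subst hq0
        unfold pvB
        simp
      · rw [if_neg hc])
  rw [hz]
  set back := (PySem.List.pyRange (n - 2) (-1) (-1)).foldl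
      (fun back i => backInner arr i back (PySem.List.pyRange (i + 1) n 1))
      (List.replicate n.toNat 0) with hback'
  set front := (PySem.List.pyRange 1 n 1).foldl
      (fun front i => frontInner arr i front (PySem.List.pyRange (i - 1) (-1) (-1)))
      (List.replicate n.toNat 0) with hfront'
  rw [PySem.List.pyRange_zero, List.foldl_map]
  rw [PySem.List.foldl_congr_mem _ _
    (fun res (k : Nat) => res + pvG xs k) _
    (fun acc k hk => by
      have hkm : k < n.toNat := List.mem_range.mp hk
      rw [PySem.List.pyGetD_natCast, PySem.List.pyGetD_natCast,
        hfront k hkm, hback k hkm]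
      rfl)]
  rw [PySem.List.foldl_add]
  simp

lemma total_spec (arr : List Int) (n : Int) (hle : n ≤ (arr.length : Int)) (v : Int) :
    ((PySem.List.pyRange 0 n 1).foldl
      (fun (t : PySem.Dict Int Int) i =>
        t.insert (PySem.List.pyGetD arr i 0) (t.getD (PySem.List.pyGetD arr i 0) 0 + 1))
      PySem.Dict.empty).getD v 0 = ((arr.take n.toNat).count v : Int) := by
  set xs := arr.take n.toNat with hxs
  have hxlen : xs.length = n.toNat := xlen arr n hle
  rw [PySem.List.pyRange_zero, List.foldl_map]
  rw [PySem.List.foldl_congr_mem _ _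
    (fun (t : PySem.Dict Int Int) (k : Nat) =>
      t.insert (pvVal xs k) (t.getD (pvVal xs k) 0 + 1)) _
    (fun t k hk => by rw [getArr arr n k (List.mem_range.mp hk)])]
  have hmap : (List.range n.toNat).map (fun k => pvVal xs k) = xs := by
    apply List.ext_getElem
    · simp [hxlen]
    · intro k h1 h2
      simp only [List.getElem_map, List.getElem_range]
      simp [pvVal, List.getD, List.getElem?_eq_getElem (by simp at h1; omega : k < xs.length)]
  rw [← List.foldl_map (f := fun k => pvVal xs k)
      (g := fun (t : PySem.Dict Int Int) v => t.insert v (t.getD v 0 + 1)), hmap]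
  rw [PySem.Dict.getD_foldl_insert_add_one]
  simp

lemma alt_loop (arr : List Int) (n : Int) (hle : n ≤ (arr.length : Int))
    (total : PySem.Dict Int Int)
    (htot : ∀ v, total.getD v 0 = ((arr.take n.toNat).count v : Int)) :
    ∀ (d : Nat) (k : Nat), n.toNat - k = d → k ≤ n.toNat → ∀ (res : Int) (seen : PySem.Dict Int Int),
      (∀ v, seen.getD v 0 = (((arr.take n.toNat).take k).count v : Int)) →
      ((PySem.List.pyRange (k : Int) n 1).foldl
        (fun (p : Int × PySem.Dict Int Int) i =>
          let v := PySem.List.pyGetD arr i 0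
          let e := p.2.getD v 0
          (p.1 + (i - e) * (total.getD v 0 - e - 1), p.2.insert v (e + 1)))
        (res, seen)).1
      = res + ((List.range' k (n.toNat - k)).map
          (fun (q : Nat) => ((q : Int) - pvB (arr.take n.toNat) q) *
            (((arr.take n.toNat).count (pvVal (arr.take n.toNat) q) : Int) - pvB (arr.take n.toNat) q - 1))).sum := by
  set xs := arr.take n.toNat with hxs
  have hxlen : xs.length = n.toNat := xlen arr n hle
  intro d
  induction d with
  | zero =>
    intro k hd hk res seen hseen
    have hkn : k = n.toNat := by omega
    subst hkn
    rw [PySem.List.pyRange_one_eq_nil (by omega)]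
    simp
  | succ d IH =>
    intro k hd hk res seen hseen
    have hkm : k < n.toNat := by omega
    rw [PySem.List.pyRange_one_cons (by omega : (k : Int) < n)]
    simp only [List.foldl_cons]
    have hv : PySem.List.pyGetD arr (k : Int) 0 = pvVal xs k := getArr arr n k hkm
    have he : seen.getD (pvVal xs k) 0 = pvB xs k := by
      rw [hseen]; rfl
    have hxk : xs[k] = pvVal xs k := by
      simp [pvVal, List.getD, List.getElem?_eq_getElem (by omega : k < xs.length)]
    have htake : xs.take (k + 1) = xs.take k ++ [xs[k]] := by
      rw [List.take_add_one, List.getElem?_eq_getElem (by omega : k < xs.length)]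
      rfl
    have hseen' : ∀ v, (seen.insert (pvVal xs k) (seen.getD (pvVal xs k) 0 + 1)).getD v 0
        = ((xs.take (k + 1)).count v : Int) := by
      intro v
      rw [PySem.Dict.getD_insert, htake, List.count_append]
      by_cases hveq : v = pvVal xs k
      · rw [if_pos hveq, hseen, hveq]
        simp [hxk]
      · rw [if_neg hveq, hseen]
        have hc0 : List.count v [xs[k]] = 0 := by
          apply List.count_eq_zero.mpr
          simp [hxk]
          intro hc
          exact hveq hc
        rw [hc0]
        simp
    have hIH := IH (k + 1) (by omega) (by omega)
      (res + ((k : Int) - seen.getD (PySem.List.pyGetD arr (k : Int) 0) 0) *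
        (total.getD (PySem.List.pyGetD arr (k : Int) 0) 0 - seen.getD (PySem.List.pyGetD arr (k : Int) 0) 0 - 1))
      (seen.insert (PySem.List.pyGetD arr (k : Int) 0) (seen.getD (PySem.List.pyGetD arr (k : Int) 0) 0 + 1))
      (by rw [hv]; exact hseen')
    rw [show ((k : Int) + 1) = ((k + 1 : Nat) : Int) from by push_cast; ring]
    rw [hIH]
    rw [show n.toNat - k = (n.toNat - (k + 1)) + 1 from by omega, List.range'_succ]
    simp only [List.map_cons, List.sum_cons]
    rw [hv, he, htot]
    ring

lemma func_alt_eq_spec (n : Int) (arr : List Int) (hn : ¬ n ≤ 2) (hle : n ≤ (arr.length : Int)) :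
    func_alt n arr = ((List.range n.toNat).map (pvG (arr.take n.toNat))).sum := by
  set xs := arr.take n.toNat with hxs
  have hxlen : xs.length = n.toNat := xlen arr n hle
  rw [func_alt, if_neg hn]
  have halt := alt_loop arr n hle _ (total_spec arr n hle) n.toNat 0 rfl (by omega) 0
    PySem.Dict.empty (by intro v; simp)
  rw [show ((0 : Nat) : Int) = (0 : Int) from rfl] at halt
  rw [halt]
  rw [zero_add, Nat.sub_zero, ← List.range_eq_range']
  refine congrArg List.sum (List.map_congr_left ?_)
  intro q hq
  have hqm : q < n.toNat := List.mem_range.mp hq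
  have hxq : xs[q] = pvVal xs q := by
    simp [pvVal, List.getD, List.getElem?_eq_getElem (by omega : q < xs.length)]
  have hsplit : ((xs.count (pvVal xs q)) : Int) = pvB xs q + 1 + pvA xs q := by
    have h1 : xs = xs.take q ++ xs[q] :: xs.drop (q + 1) := by
      conv_lhs => rw [← List.take_append_drop q xs]
      rw [List.drop_eq_getElem_cons (by omega : q < xs.length)]
    rw [show (xs.count (pvVal xs q))
        = ((xs.take q ++ xs[q] :: xs.drop (q + 1)).count (pvVal xs q)) from by rw [← h1]]
    rw [List.count_append, List.count_cons]
    unfold pvB pvA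
    simp [hxq]
    ring
  rw [hsplit, pvG]
  ring

-- ===== VERDICT (by name: the statement is the Claim_ definition above) =====
theorem func_spec : Claim_equal_func := by
  intro n arr _ hpre
  unfold Spec_func
  by_cases hn : n ≤ 2
  · simp [func, func_alt, hn]
  · rcases hpre with h | hle
    · exact absurd h hn
    · rw [func_eq_spec n arr hn hle, func_alt_eq_spec n arr hn hle]
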